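-- pv_equiv track=rewrite | github.com/bassyu/ps | programmers/2_양궁대회.py | dfs
-- ===== SOURCE A (Python) =====
-- def dfs(arrow, info, i, apeach, ryan, history):
--     if i == 11:
--         history[-1] = arrow
--         if ryan > apeach:
--             return [(ryan-apeach, history)]
--
--         return []
--
--     point = 10 - i
--     result = dfs(arrow, info, i+1, apeach+point*bool(info[i]), ryan, history+[0])
--
--     for_win = info[i] + 1
--     if for_win <= arrow:
--         result += dfs(arrow-for_win, info, i+1, apeach, ryan+point, history+[for_win])
--
--     return result
-- ===== SOURCE B (Python) =====
-- def dfs(arrow, info, i, apeach, ryan, history):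
--     # Iterative DFS with an explicit LIFO stack of frames instead of recursion.
--     # Return-value equivalent to A; unlike A it does not mutate `history` in place.
--     out = []
--     stack = [(arrow, i, apeach, ryan, history)]
--     while stack:
--         arrow, i, apeach, ryan, history = stack.pop()
--         if i == 11:
--             if ryan > apeach:
--                 out.append((ryan - apeach, history[:-1] + [arrow]))
--         else:
--             point = 10 - i
--             for_win = info[i] + 1
--             if for_win <= arrow:
--                 stack.append((arrow - for_win, i + 1, apeach, ryan + point, history + [for_win]))
--             stack.append((arrow, i + 1, apeach + point * bool(info[i]), ryan, history + [0]))
--     return out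
-- ===== Notes on version B (the rewrite author's own statement) =====
-- stated objective: alternative
-- what changed: Replaces A's recursion (with list-concatenation of subtree results) by an iterative DFS over an explicit LIFO stack of frames, pushing the win child before the not-win child and appending leaf results to one output list in pop order; B also builds the leaf history functionally instead of mutating it in place.
-- outside the precondition, e.g. on dfs(0, [0, 0, 0, 0, 0, 0, 0, 0, 0, 0, 0], -1, 0, 0, []): A returns [], B returns []
import Mathlib
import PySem

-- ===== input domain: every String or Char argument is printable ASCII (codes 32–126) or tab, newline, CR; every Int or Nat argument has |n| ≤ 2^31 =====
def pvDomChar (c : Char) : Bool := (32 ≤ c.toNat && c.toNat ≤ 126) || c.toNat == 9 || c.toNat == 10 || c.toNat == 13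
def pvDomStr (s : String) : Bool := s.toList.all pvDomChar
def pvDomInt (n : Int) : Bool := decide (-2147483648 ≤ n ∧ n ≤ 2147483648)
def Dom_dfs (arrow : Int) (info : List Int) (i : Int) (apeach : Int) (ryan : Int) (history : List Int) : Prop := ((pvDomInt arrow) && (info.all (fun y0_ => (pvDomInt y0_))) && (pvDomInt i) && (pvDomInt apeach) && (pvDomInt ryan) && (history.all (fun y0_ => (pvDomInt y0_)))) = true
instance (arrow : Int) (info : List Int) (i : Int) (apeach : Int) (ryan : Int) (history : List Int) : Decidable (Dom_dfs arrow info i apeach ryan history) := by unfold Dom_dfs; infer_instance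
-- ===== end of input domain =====

-- B replaces A's recursion by an iterative DFS over an explicit LIFO stack of frames (alternative
-- decomposition, same cost). A mutates `history` in place at i == 11; B does not — the equivalence
-- proved here is about the RETURN value only.

-- ===== PORT A =====
-- Literal port of A's recursion. Termination guard: the `else []` branch covers i > 11, where the
-- Python recursion never reaches the base case (RecursionError); Pre_dfs excludes those inputs.
def dfs (arrow : Int) (info : List Int) (i : Int) (apeach : Int) (ryan : Int) (history : List Int) : List (Int × List Int) :=
  if i = 11 then
    -- history[-1] = arrow (Pre_dfs guarantees history ≠ [] here)
    let history := history.dropLast ++ [arrow]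
    if apeach < ryan then [(ryan - apeach, history)] else []
  else if _h : i < 11 then
    let point : Int := 10 - i
    let infoi : Int := (PySem.List.pyGet? info i).getD 0  -- Pre_dfs keeps the index in range
    let result := dfs arrow info (i + 1) (apeach + point * (if infoi = 0 then 0 else 1)) ryan (history ++ [0])
    let forWin : Int := infoi + 1
    if forWin ≤ arrow then
      result ++ dfs (arrow - forWin) info (i + 1) apeach (ryan + point) (history ++ [forWin])
    else result
  else []
termination_by (11 - i).toNat
decreasing_by all_goals omega

-- ===== PORT B =====
-- The while loop of Source B: pop a frame, handle a leaf or push the two children (win child first).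
-- The Nat fuel is only the loop guard; 8192 iterations always suffice under Pre_dfs.
def dfsLoop (info : List Int) : Nat → List (Int × Int × Int × Int × List Int) → List (Int × List Int) → List (Int × List Int)
  | 0, _, out => out
  | _ + 1, [], out => out
  | f + 1, (arrow, i, apeach, ryan, history) :: rest, out =>
    if i = 11 then
      if apeach < ryan then
        dfsLoop info f rest (out ++ [(ryan - apeach, history.dropLast ++ [arrow])])
      else dfsLoop info f rest out
    else
      let point : Int := 10 - i
      let infoi : Int := (PySem.List.pyGet? info i).getD 0
      let forWin : Int := infoi + 1
      let st1 := if forWin ≤ arrow then (arrow - forWin, i + 1, apeach, ryan + point, history ++ [forWin]) :: rest else rest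
      dfsLoop info f ((arrow, i + 1, apeach + point * (if infoi = 0 then 0 else 1), ryan, history ++ [0]) :: st1) out

def dfs_alt (arrow : Int) (info : List Int) (i : Int) (apeach : Int) (ryan : Int) (history : List Int) : List (Int × List Int) :=
  dfsLoop info 8192 [(arrow, i, apeach, ryan, history)] []

-- ===== PRECONDITION & SPEC =====
-- Pre_dfs excludes the inputs where the Python A raises or diverges (i > 11: unbounded recursion;
-- i = 11 with empty history: IndexError on history[-1]; i < 11 with len(info) < 11: IndexError on
-- info[i]); it also restricts to the natural domain 0 ≤ i — A returns via Python's negative-index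
-- wraparound on some negative i, which is outside the task's natural call pattern.
def Pre_dfs (arrow : Int) (info : List Int) (i : Int) (apeach : Int) (ryan : Int) (history : List Int) : Prop :=
  0 ≤ i ∧ i ≤ 11 ∧ (i < 11 → (11 : Int) ≤ info.length) ∧ (i = 11 → history ≠ [])
instance (arrow : Int) (info : List Int) (i : Int) (apeach : Int) (ryan : Int) (history : List Int) : Decidable (Pre_dfs arrow info i apeach ryan history) := by unfold Pre_dfs; infer_instance

def pvWitness_dfs : Int × List Int × Int × Int × Int × List Int :=
  (2, [0, 0, 0, 0, 0, 0, 0, 0, 0, 0, 0], 9, 1, 0, [1, 1])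

def Spec_dfs (arrow : Int) (info : List Int) (i : Int) (apeach : Int) (ryan : Int) (history : List Int) (out : List (Int × List Int)) : Prop := out = dfs_alt arrow info i apeach ryan history
instance (arrow : Int) (info : List Int) (i : Int) (apeach : Int) (ryan : Int) (history : List Int) (out : List (Int × List Int)) : Decidable (Spec_dfs arrow info i apeach ryan history out) := by unfold Spec_dfs; infer_instance

-- ===== CLAIM (what is proved, stated in full; the proofs are below) =====
def Claim_equal_dfs : Prop := ∀ (arrow : Int) (info : List Int) (i : Int) (apeach : Int) (ryan : Int) (history : List Int), Dom_dfs arrow info i apeach ryan history → Pre_dfs arrow info i apeach ryan history → Spec_dfs arrow info i apeach ryan history (dfs arrow info i apeach ryan history)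

-- ===== LEMMAS AND PROOFS =====

-- fuel weight of a stack frame: enough pops to exhaust its whole subtree
def pvWeight (fr : Int × Int × Int × Int × List Int) : Nat := 2 ^ ((13 - fr.2.1).toNat) - 1

def pvSumW (st : List (Int × Int × Int × Int × List Int)) : Nat := (st.map pvWeight).sum

-- the recursive A-value of one stack frame
def pvVal (info : List Int) (fr : Int × Int × Int × Int × List Int) : List (Int × List Int) :=
  dfs fr.1 info fr.2.1 fr.2.2.1 fr.2.2.2.1 fr.2.2.2.2

theorem dfsLoop_spec : ∀ (f : Nat) (info : List Int) (st : List (Int × Int × Int × Int × List Int)) (out : List (Int × List Int)),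
    (∀ fr ∈ st, fr.2.1 ≤ 11) → pvSumW st ≤ f →
    dfsLoop info f st out = out ++ st.flatMap (pvVal info) := by
  intro f
  induction f with
  | zero =>
    intro info st out hinv hw
    cases st with
    | nil => simp [dfsLoop]
    | cons fr rest =>
      exfalso
      have h11 : fr.2.1 ≤ 11 := hinv fr (by simp)
      have : 2 ≤ (13 - fr.2.1).toNat := by omega
      have hpow : 2 ^ 2 ≤ 2 ^ ((13 - fr.2.1).toNat) := Nat.pow_le_pow_right (by norm_num) this
      have : pvWeight fr ≤ pvSumW (fr :: rest) := by
        simp [pvSumW, pvWeight]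
      simp [pvWeight] at this
      omega
  | succ f ih =>
    intro info st out hinv hw
    cases st with
    | nil => simp [dfsLoop]
    | cons fr rest =>
      obtain ⟨arrow, i, apeach, ryan, history⟩ := fr
      have h11 : i ≤ 11 := hinv (arrow, i, apeach, ryan, history) (by simp)
      have hrestinv : ∀ fr ∈ rest, fr.2.1 ≤ 11 := fun fr h => hinv fr (by simp [h])
      have hsum : pvSumW ((arrow, i, apeach, ryan, history) :: rest) = pvWeight (arrow, i, apeach, ryan, history) + pvSumW rest := by
        simp [pvSumW]
      by_cases hi : i = 11
      · subst hi
        have hwr : pvSumW rest ≤ f := by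
          have : 1 ≤ pvWeight (arrow, (11:Int), apeach, ryan, history) := by
            simp [pvWeight]
          omega
        rw [dfsLoop]
        by_cases hr : apeach < ryan
        · rw [if_pos hr, ih info rest _ hrestinv hwr]
          simp [pvVal, dfs, if_pos hr]
        · rw [if_neg hr, ih info rest _ hrestinv hwr]
          simp [pvVal, dfs, if_neg hr]
      · have hilt : i < 11 := lt_of_le_of_ne h11 hi
        -- weight bookkeeping: parent weight = 2 * child weight + 1
        have hkey : (13 - i).toNat = (12 - i).toNat + 1 := by omega
        have hchild : (13 - (i + 1)).toNat = (12 - i).toNat := by omega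
        have hpos : 1 ≤ 2 ^ ((12 - i).toNat) := Nat.one_le_two_pow
        have hwpar : pvWeight (arrow, i, apeach, ryan, history) = 2 * 2 ^ ((12 - i).toNat) - 1 := by
          simp [pvWeight, hkey, pow_succ]; ring_nf
        set c0 : Int × Int × Int × Int × List Int :=
          (arrow, i + 1, apeach + (10 - i) * (if ((PySem.List.pyGet? info i).getD 0) = 0 then 0 else 1), ryan, history ++ [0]) with hc0
        set c1 : Int × Int × Int × Int × List Int :=
          (arrow - (((PySem.List.pyGet? info i).getD 0) + 1), i + 1, apeach, ryan + (10 - i), history ++ [(((PySem.List.pyGet? info i).getD 0) + 1)]) with hc1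
        have hwc : pvWeight c0 = 2 ^ ((12 - i).toNat) - 1 ∧ pvWeight c1 = 2 ^ ((12 - i).toNat) - 1 := by
          constructor <;> simp [pvWeight, hc0, hc1, hchild]
        have hc011 : c0.2.1 ≤ 11 := by simp [hc0]; omega
        have hc111 : c1.2.1 ≤ 11 := by simp [hc1]; omega
        rw [dfsLoop]
        simp only [if_neg hi]
        by_cases hwin : ((PySem.List.pyGet? info i).getD 0) + 1 ≤ arrow
        · rw [if_pos hwin]
          have hst : pvSumW (c0 :: c1 :: rest) ≤ f := by
            have : pvSumW (c0 :: c1 :: rest) = pvWeight c0 + (pvWeight c1 + pvSumW rest) := by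
              simp [pvSumW]
            omega
          have hinv' : ∀ fr ∈ (c0 :: c1 :: rest), fr.2.1 ≤ 11 := by
            intro fr h
            rcases h with _ | ⟨_, h⟩
            · exact hc011
            · rcases h with _ | ⟨_, h⟩
              · exact hc111
              · exact hrestinv _ (by simpa using h)
          rw [ih info (c0 :: c1 :: rest) out hinv' hst]
          have hA : pvVal info (arrow, i, apeach, ryan, history) = pvVal info c0 ++ pvVal info c1 := by
            simp only [pvVal, hc0, hc1]
            rw [dfs]
            simp only [if_neg hi, dif_pos hilt, if_pos hwin]
          simp [hA, List.flatMap_cons]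
        · rw [if_neg hwin]
          have hst : pvSumW (c0 :: rest) ≤ f := by
            have : pvSumW (c0 :: rest) = pvWeight c0 + pvSumW rest := by simp [pvSumW]
            omega
          have hinv' : ∀ fr ∈ (c0 :: rest), fr.2.1 ≤ 11 := by
            intro fr h
            rcases h with _ | ⟨_, h⟩
            · exact hc011
            · exact hrestinv _ (by simpa using h)
          rw [ih info (c0 :: rest) out hinv' hst]
          have hA : pvVal info (arrow, i, apeach, ryan, history) = pvVal info c0 := by
            simp only [pvVal, hc0]
            rw [dfs]
            simp only [if_neg hi, dif_pos hilt, if_neg hwin]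
          simp [hA, List.flatMap_cons]

-- ===== VERDICT (by name: the statement is the Claim_ definition above) =====
theorem dfs_spec : Claim_equal_dfs := by
  intro arrow info i apeach ryan history _hdom hpre
  obtain ⟨hi0, hi11, _, _⟩ := hpre
  show dfs arrow info i apeach ryan history = dfs_alt arrow info i apeach ryan history
  have hw : pvSumW [(arrow, i, apeach, ryan, history)] ≤ 8192 := by
    have h13 : (13 - i).toNat ≤ 13 := by omega
    have : 2 ^ ((13 - i).toNat) ≤ 2 ^ 13 := Nat.pow_le_pow_right (by norm_num) h13
    simp [pvSumW, pvWeight]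
    omega
  have := dfsLoop_spec 8192 info [(arrow, i, apeach, ryan, history)] [] (by intro fr h; simp at h; subst h; exact hi11) hw
  unfold dfs_alt
  rw [this]
  simp [pvVal]
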